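-- pv_equiv track=rewrite | github.com/dn0rmand/Advent-Of-Code | 2019/day6.py | part2
-- ===== SOURCE A (Python) =====
-- def part2(orbits, orbited):
--     answer = 0
--
--     start = orbits.get('YOU')
--     end   = orbits.get('SAN')
--     if start == None or end == None:
--         raise Exception('No fair')
--
--     if start == end:
--         return 0
--
--     states = [start]
--     visited= {}
--     visited[start] = 1
--     visited['YOU'] = 1
--     visited['SAN'] = 1
--
--     moves = 0
--     while True:
--         moves += 1
--         newStates = {}
--         for s in states:
--             t = orbits.get(s)
--             if not t == None:
--                 if visited.get(t) == None:
--                     newStates[t] = 1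
--                     visited[t] = 1
--
--             if not orbited.get(s) == None:
--                 for t in orbited.get(s):
--                     if visited.get(t) == None:
--                         newStates[t] = 1
--                         visited[t] = 1
--
--         if newStates.get(end) != None:
--             break
--         states = newStates.keys()
--
--     return moves
-- ===== SOURCE B (Python) =====
-- def part2(orbits, orbited):
--     start = orbits.get('YOU')
--     end = orbits.get('SAN')
--     if start == None or end == None:
--         raise Exception('No fair')
--
--     # distance of every ancestor of start (walk the parent chain once)
--     dist = {}
--     node, d = start, 0
--     while node is not None and node not in dist:
--         dist[node] = d
--         node = orbits.get(node)
--         d += 1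
--
--     # walk up from end until we meet that chain (the lowest common ancestor)
--     node, steps = end, 0
--     while node not in dist:
--         node = orbits.get(node)
--         steps += 1
--         if node is None or steps > len(orbits):
--             raise Exception('No path')
--     return steps + dist[node]
-- ===== Notes on version B (the rewrite author's own statement) =====
-- stated objective: simpler
-- what changed: Replaces A's level-by-level BFS frontier over parent and child edges with two linear parent-chain walks: B records every ancestor of YOU's parent with its distance in a dict, then walks up from SAN's parent until it hits that chain (the lowest common ancestor) and returns the walk length plus the stored distance.
-- outside the precondition, e.g. on part2({'YOU': 'a', 'SAN': 'c'}, {'a': ['c']}): A returns 1, B raises Exception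
import Mathlib
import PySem

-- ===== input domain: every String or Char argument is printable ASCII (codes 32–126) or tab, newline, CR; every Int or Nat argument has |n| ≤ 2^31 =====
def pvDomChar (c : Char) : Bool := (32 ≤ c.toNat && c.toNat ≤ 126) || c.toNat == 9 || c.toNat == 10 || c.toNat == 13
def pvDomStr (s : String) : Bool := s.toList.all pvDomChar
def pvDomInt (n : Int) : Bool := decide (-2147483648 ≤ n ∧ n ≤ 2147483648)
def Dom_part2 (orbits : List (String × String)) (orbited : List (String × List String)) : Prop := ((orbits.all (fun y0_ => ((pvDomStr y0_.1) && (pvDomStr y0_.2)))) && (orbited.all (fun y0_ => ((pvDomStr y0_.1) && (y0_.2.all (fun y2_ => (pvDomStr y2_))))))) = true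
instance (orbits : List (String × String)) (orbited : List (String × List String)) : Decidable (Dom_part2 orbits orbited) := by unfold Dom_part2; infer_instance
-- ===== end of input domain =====

-- B replaces A's level-by-level BFS frontier with two parent-chain walks and a
-- lookup (ancestor distances of YOU's parent, then walk up from SAN's parent to
-- the first common ancestor); equivalence is claimed on well-formed orbit maps
-- (Pre_part2 below).

-- ===== PORT A =====
-- A's 'while True' BFS loop, ported with fuel; on the admitted inputs the loop
-- breaks before the fuel runs out, so the 0 returned on exhaustion is dead code.
-- the body of A's 'if visited.get(t) == None:' block (shared by both edge kinds)
def bfsAdd (acc : PySem.Dict String Int × PySem.Dict String Int) (t : String) :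
    PySem.Dict String Int × PySem.Dict String Int :=
  if (PySem.Dict.get? acc.2 t).isNone then
    (PySem.Dict.insert acc.1 t 1, PySem.Dict.insert acc.2 t 1)
  else acc

-- the body of A's 'for s in states:' loop: the parent edge, then the orbited edges
def bfsVisit (O : PySem.Dict String String) (D : PySem.Dict String (List String))
    (acc : PySem.Dict String Int × PySem.Dict String Int) (s : String) :
    PySem.Dict String Int × PySem.Dict String Int :=
  let acc1 :=
    match PySem.Dict.get? O s with
    | some t => bfsAdd acc t
    | none => acc
  match PySem.Dict.get? D s with
  | some l => l.foldl bfsAdd acc1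
  | none => acc1

-- A's 'while True' BFS loop, ported with fuel; on the admitted inputs the loop
-- breaks before the fuel runs out, so the 0 returned on exhaustion is dead code.
def part2Loop (O : PySem.Dict String String) (D : PySem.Dict String (List String))
    (endN : String) : Nat → List String → PySem.Dict String Int → Int → Int
  | 0, _, _, _ => 0
  | fuel+1, states, visited, moves =>
    let moves := moves + 1
    let step := states.foldl (bfsVisit O D) (PySem.Dict.empty, visited)
    if (PySem.Dict.get? step.1 endN).isSome then moves
    else part2Loop O D endN fuel (PySem.Dict.keys step.1) step.2 moves

def part2 (orbits : List (String × String)) (orbited : List (String × List String)) : Int :=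
  let O := PySem.Dict.mk orbits
  match PySem.Dict.get? O "YOU", PySem.Dict.get? O "SAN" with
  | some start, some endN =>
    if start = endN then 0
    else
      part2Loop O (PySem.Dict.mk orbited) endN (2 * orbits.length + 2) [start]
        (PySem.Dict.insert (PySem.Dict.insert (PySem.Dict.insert PySem.Dict.empty start 1) "YOU" 1) "SAN" 1) 0
  | _, _ => 0  -- Python raises Exception('No fair') here; excluded by Pre_part2

-- ===== PORT B =====
-- first loop of Source B: record each ancestor of start with its distance
def buildDist (O : PySem.Dict String String) :
    Nat → Option String → Int → PySem.Dict String Int → PySem.Dict String Int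
  | 0, _, _, dist => dist
  | _+1, none, _, dist => dist
  | fuel+1, some n, d, dist =>
    if (PySem.Dict.get? dist n).isSome then dist
    else buildDist O fuel (PySem.Dict.get? O n) (d + 1) (PySem.Dict.insert dist n d)

-- second loop of Source B: walk up from end until the chain is met; the fuel is
-- Source B's 'steps > len(orbits)' bound, and 0 stands for its raise (dead under Pre_)
-- second loop of Source B: walk up from end until the chain is met; the fuel is
-- Source B's 'steps > len(orbits)' bound, and 0 stands for its raise (dead under Pre_)
def walkUp (O : PySem.Dict String String) (dist : PySem.Dict String Int) :
    Nat → String → Int → Int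
  | 0, n, steps =>
    match PySem.Dict.get? dist n with
    | some dv => steps + dv
    | none => 0    -- Python raises Exception('No path'); excluded by Pre_part2
  | fuel+1, n, steps =>
    match PySem.Dict.get? dist n with
    | some dv => steps + dv
    | none =>
      match PySem.Dict.get? O n with
      | none => 0  -- Python raises Exception('No path'); excluded by Pre_part2
      | some p => walkUp O dist fuel p (steps + 1)

def part2_alt (orbits : List (String × String)) (orbited : List (String × List String)) : Int :=
  let O := PySem.Dict.mk orbits
  match PySem.Dict.get? O "YOU" with
  | none => 0  -- Python raises Exception('No fair') here; excluded by Pre_part2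
  | some start =>
    match PySem.Dict.get? O "SAN" with
    | none => 0  -- Python raises Exception('No fair') here; excluded by Pre_part2
    | some endN =>
      let dist := buildDist O (orbits.length + 2) (some start) 0 PySem.Dict.empty
      walkUp O dist orbits.length endN 0

-- ===== PRECONDITION & SPEC =====
-- the ancestor list of v (v, its parent, its grandparent, …), truncated at
-- orbits.length+1 entries; Pre_part2 states acyclicity ('every key's ancestor
-- list repeats no node and ends at a root') and connectedness ('the ancestor
-- lists of YOU's and SAN's parents share a node') with it
def ancChain (O : PySem.Dict String String) : Nat → String → List String
  | 0, v => [v]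
  | fuel+1, v =>
    match PySem.Dict.get? O v with
    | none => [v]
    | some p => v :: ancChain O fuel p

-- Pre_part2 admits: both 'YOU' and 'SAN' present (else A raises); then either the
-- two parents coincide (A returns 0 at once), or SAN's parent is YOU's grandparent
-- (A's first BFS level finds it), or the pair is a well-formed orbit map as the
-- caller builds it — orbited is exactly the inverse of orbits, parent links are
-- acyclic and rooted, nothing orbits the ships YOU/SAN, and the two parent chains
-- meet. On pairs where orbited disagrees with orbits the two programs answer
-- different well-defined questions (A counts over whatever edges orbited lists, B
-- over the parent chains alone), and on disconnected or cyclic maps A's while-loop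
-- never terminates; both kinds of pair lie outside Pre_.
-- (ancChain below is not either port's loop: it is the ancestor LIST of a node —
-- the shape data of the input tree that acyclicity and connectedness talk about.)
def Pre_part2 (orbits : List (String × String)) (orbited : List (String × List String)) : Prop :=
  ((PySem.Dict.get? (PySem.Dict.mk orbits) "YOU").isSome ∧ (PySem.Dict.get? (PySem.Dict.mk orbits) "SAN").isSome) ∧
  (let O := PySem.Dict.mk orbits
   let Dd := PySem.Dict.mk orbited
   let s := (PySem.Dict.get? O "YOU").getD ""
   let e := (PySem.Dict.get? O "SAN").getD ""
   let F := orbits.length + 1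
   s = e ∨
   (PySem.Dict.get? O s = some e ∧ e ≠ "YOU" ∧ e ≠ "SAN" ∧ s ≠ e) ∨
   ((∀ u ∈ orbits.map Prod.fst, u ∈ PySem.Dict.getD Dd (PySem.Dict.getD O u "") []) ∧
    (∀ p ∈ orbited.map Prod.fst, ∀ u ∈ PySem.Dict.getD Dd p [], PySem.Dict.get? O u = some p) ∧
    (∀ v ∈ orbits.map Prod.fst,
      (ancChain O F v).Nodup ∧ PySem.Dict.get? O ((ancChain O F v).getLastD v) = none) ∧
    "YOU" ∉ orbits.map Prod.snd ∧ "SAN" ∉ orbits.map Prod.snd ∧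
    (∃ x ∈ ancChain O F s, x ∈ ancChain O F e)))
instance (orbits : List (String × String)) (orbited : List (String × List String)) : Decidable (Pre_part2 orbits orbited) := by unfold Pre_part2; infer_instance

def pvWitness_part2 : (List (String × String)) × (List (String × List String)) :=
  ([("B", "COM"), ("C", "B"), ("D", "C"), ("E", "D"), ("YOU", "E"), ("I", "D"), ("SAN", "I")],
   [("COM", ["B"]), ("B", ["C"]), ("C", ["D"]), ("D", ["E", "I"]), ("E", ["YOU"]), ("I", ["SAN"])])

def Spec_part2 (orbits : List (String × String)) (orbited : List (String × List String)) (out : Int) : Prop := out = part2_alt orbits orbited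
instance (orbits : List (String × String)) (orbited : List (String × List String)) (out : Int) : Decidable (Spec_part2 orbits orbited out) := by unfold Spec_part2; infer_instance

-- ===== CLAIM (what is proved, stated in full; the proofs are below) =====
def Claim_equal_part2 : Prop := ∀ (orbits : List (String × String)) (orbited : List (String × List String)), Dom_part2 orbits orbited → Pre_part2 orbits orbited → Spec_part2 orbits orbited (part2 orbits orbited)

-- ===== LEMMAS AND PROOFS =====

-- ---------- generic dict helpers ----------
theorem pv_mem_keys_iff {ν : Type} (d : PySem.Dict String ν) (v : String) :
    v ∈ PySem.Dict.keys d ↔ (PySem.Dict.get? d v).isSome := by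
  rw [← PySem.Dict.contains_iff_mem_keys, PySem.Dict.contains_eq_isSome_get?]

-- ---------- parent chains ----------
inductive PChain (O : PySem.Dict String String) : String → List String → Prop
  | root (v : String) : PySem.Dict.get? O v = none → PChain O v [v]
  | step (v p : String) (c : List String) :
      PySem.Dict.get? O v = some p → PChain O p c → PChain O v (v :: c)

theorem pchain_ne_nil {O : PySem.Dict String String} {v : String} {c : List String}
    (h : PChain O v c) : c ≠ [] := by cases h <;> simp

theorem pchain_head {O : PySem.Dict String String} {v : String} {c : List String}
    (h : PChain O v c) : c.head? = some v := by cases h <;> rfl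

theorem pchain_unique {O : PySem.Dict String String} {v : String} {c c' : List String}
    (h : PChain O v c) (h' : PChain O v c') : c = c' := by
  induction h generalizing c' with
  | root v hv => cases h' with
    | root => rfl
    | step v p c hp => rw [hv] at hp; cases hp
  | step v p c hp hc ih =>
    cases h' with
    | root _ hv => rw [hv] at hp; cases hp
    | step _ q c' hq hc' =>
      rw [hp] at hq; cases hq; rw [ih hc']

theorem pv_getLastD_irrel (c : List String) (h : c ≠ []) (d d' : String) :
    c.getLastD d = c.getLastD d' := by
  cases c with
  | nil => exact absurd rfl h
  | cons a l => rw [List.getLastD_cons, List.getLastD_cons]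

theorem ancChain_ne_nil (O : PySem.Dict String String) (f : Nat) (v : String) :
    ancChain O f v ≠ [] := by
  cases f with
  | zero => simp [ancChain]
  | succ f => cases h : PySem.Dict.get? O v <;> simp [ancChain, h]

theorem pchain_ancChain (O : PySem.Dict String String) (f : Nat) (v : String)
    (h : PySem.Dict.get? O ((ancChain O f v).getLastD v) = none) :
    PChain O v (ancChain O f v) := by
  induction f generalizing v with
  | zero => simpa [ancChain] using PChain.root v (by simpa [ancChain] using h)
  | succ f ih =>
    cases hv : PySem.Dict.get? O v with
    | none => simpa [ancChain, hv] using PChain.root v hv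
    | some p =>
      have hne := ancChain_ne_nil O f p
      have hlast : (ancChain O (f+1) v).getLastD v = (ancChain O f p).getLastD p := by
        have hc : ancChain O (f+1) v = v :: ancChain O f p := by simp [ancChain, hv]
        rw [hc, List.getLastD_cons]
        exact pv_getLastD_irrel _ hne v p
      rw [hlast] at h
      simpa [ancChain, hv] using PChain.step v p _ hv (ih p h)

-- tails of a chain are chains
theorem pchain_drop {O : PySem.Dict String String} {v : String} {c : List String}
    (h : PChain O v c) (i : Nat) (hi : i < c.length) :
    PChain O (c.get ⟨i, hi⟩) (c.drop i) := by
  induction h generalizing i with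
  | root w hw =>
    cases i with
    | zero => simpa using PChain.root w hw
    | succ i => simp at hi
  | step w p c hp hc ih =>
    cases i with
    | zero => simpa using PChain.step w p c hp hc
    | succ i =>
      simp only [List.length_cons, Nat.succ_lt_succ_iff] at hi
      simpa using ih i hi

theorem pchain_get? {O : PySem.Dict String String} {v : String} {c : List String}
    (h : PChain O v c) (i : Nat) (hi : i + 1 < c.length) :
    PySem.Dict.get? O (c.get ⟨i, by omega⟩) = some (c.get ⟨i+1, hi⟩) := by
  induction h generalizing i with
  | root w hw => simp at hi
  | step w p c hp hc ih =>
    cases i with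
    | zero =>
      have h0 : c.head? = some p := pchain_head hc
      simp only [List.length_cons, Nat.succ_lt_succ_iff] at hi
      simp only [List.get]
      rw [hp]
      congr 1
      cases c with
      | nil => simp at hi
      | cons a l => simpa using h0.symm
    | succ i =>
      simp only [List.length_cons, Nat.succ_lt_succ_iff] at hi
      simpa using ih i hi

theorem pchain_last {O : PySem.Dict String String} {v : String} {c : List String}
    (h : PChain O v c) (d : String) :
    PySem.Dict.get? O (c.getLastD d) = none := by
  induction h generalizing d with
  | root w hw => simpa using hw
  | step w p c hp hc ih =>
    have hne := pchain_ne_nil hc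
    cases hc2 : c with
    | nil => exact absurd hc2 hne
    | cons a l => simp only [hc2] at ih ⊢; simpa using ih d

-- ---------- chains at full fuel ----------
theorem ancChain_head (O : PySem.Dict String String) (F : Nat) (v : String) :
    (ancChain O F v).head? = some v := by
  cases F with
  | zero => rfl
  | succ f => cases h : PySem.Dict.get? O v <;> simp [ancChain, h]

theorem ancChain_self_mem (O : PySem.Dict String String) (F : Nat) (v : String) :
    v ∈ ancChain O F v := by
  cases F with
  | zero => simp [ancChain]
  | succ f => cases h : PySem.Dict.get? O v <;> simp [ancChain, h]

theorem ancChain_cons {O : PySem.Dict String String} {F : Nat}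
    (hch : ∀ w, PChain O w (ancChain O F w)) {v p : String}
    (hv : PySem.Dict.get? O v = some p) :
    ancChain O F v = v :: ancChain O F p := by
  have h1 := hch v
  generalize hc : ancChain O F v = c at h1
  cases h1 with
  | root _ h => rw [hv] at h; cases h
  | step _ q c' hq hc' =>
    rw [hv] at hq; cases hq
    rw [pchain_unique hc' (hch p)]

-- ---------- meeting point and distance from s ----------
def jIdx (O : PySem.Dict String String) (F : Nat) (s v : String) : Nat :=
  (ancChain O F v).findIdx (fun x => decide (x ∈ ancChain O F s))

def mNode (O : PySem.Dict String String) (F : Nat) (s v : String) : String :=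
  (ancChain O F v).getD (jIdx O F s v) v

def dT (O : PySem.Dict String String) (F : Nat) (s v : String) : Nat :=
  jIdx O F s v + (ancChain O F s).idxOf (mNode O F s v)

def Meets (O : PySem.Dict String String) (F : Nat) (s v : String) : Prop :=
  ∃ x ∈ ancChain O F v, x ∈ ancChain O F s

theorem meets_self (O : PySem.Dict String String) (F : Nat) (s : String) :
    Meets O F s s :=
  ⟨s, ancChain_self_mem O F s, ancChain_self_mem O F s⟩

theorem meets_of_mem_cS {O : PySem.Dict String String} {F : Nat} {s v : String}
    (h : v ∈ ancChain O F s) : Meets O F s v :=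
  ⟨v, ancChain_self_mem O F v, h⟩

theorem jIdx_lt {O : PySem.Dict String String} {F : Nat} {s v : String}
    (hm : Meets O F s v) : jIdx O F s v < (ancChain O F v).length := by
  apply List.findIdx_lt_length_of_exists
  obtain ⟨x, hx, hxs⟩ := hm
  exact ⟨x, hx, by simpa using hxs⟩

theorem mNode_eq_getElem {O : PySem.Dict String String} {F : Nat} {s v : String}
    (hm : Meets O F s v) :
    mNode O F s v = (ancChain O F v)[jIdx O F s v]'(jIdx_lt hm) := by
  unfold mNode
  rw [List.getD_eq_getElem?_getD, List.getElem?_eq_getElem (jIdx_lt hm)]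
  rfl

theorem mNode_mem_cS {O : PySem.Dict String String} {F : Nat} {s v : String}
    (hm : Meets O F s v) : mNode O F s v ∈ ancChain O F s := by
  rw [mNode_eq_getElem hm]
  have := @List.findIdx_getElem _ (fun x => decide (x ∈ ancChain O F s)) (ancChain O F v) (jIdx_lt hm)
  simpa using this

-- membership in s's chain pins down the whole distance data
theorem chain_eq_drop {O : PySem.Dict String String} {F : Nat} {s v : String}
    (hch : ∀ w, PChain O w (ancChain O F w))
    (hv : v ∈ ancChain O F s) :
    ancChain O F v = (ancChain O F s).drop ((ancChain O F s).idxOf v) := by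
  have hlt := List.idxOf_lt_length_of_mem hv
  have h1 := pchain_drop (hch s) ((ancChain O F s).idxOf v) hlt
  have h2 : (ancChain O F s).get ⟨(ancChain O F s).idxOf v, hlt⟩ = v := by
    simpa using List.getElem_idxOf hlt
  rw [h2] at h1
  exact pchain_unique (hch v) h1

theorem dT_of_mem_cS {O : PySem.Dict String String} {F : Nat} {s v : String}
    (hch : ∀ w, PChain O w (ancChain O F w))
    (hv : v ∈ ancChain O F s) :
    jIdx O F s v = 0 ∧ mNode O F s v = v ∧ dT O F s v = (ancChain O F s).idxOf v := by
  have hlt := List.idxOf_lt_length_of_mem hv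
  have hd : ancChain O F v = v :: (ancChain O F s).drop ((ancChain O F s).idxOf v + 1) := by
    rw [chain_eq_drop hch hv, List.drop_eq_getElem_cons hlt]
    congr 1
    simpa using List.getElem_idxOf hlt
  have hj : jIdx O F s v = 0 := by
    unfold jIdx
    rw [hd, List.findIdx_cons]
    simp [hv]
  have hmn : mNode O F s v = v := by
    unfold mNode
    rw [hj, hd]
    rfl
  exact ⟨hj, hmn, by unfold dT; rw [hj, hmn]; omega⟩

theorem off_chain_step {O : PySem.Dict String String} {F : Nat} {s v : String}
    (hch : ∀ w, PChain O w (ancChain O F w))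
    (hm : Meets O F s v) (hv : v ∉ ancChain O F s) :
    ∃ p, PySem.Dict.get? O v = some p ∧ Meets O F s p ∧
      jIdx O F s v = jIdx O F s p + 1 ∧ mNode O F s v = mNode O F s p ∧
      dT O F s v = dT O F s p + 1 := by
  have h1 := hch v
  generalize hc : ancChain O F v = c at h1
  cases h1 with
  | root _ h =>
    exfalso
    obtain ⟨x, hx, hxs⟩ := hm
    rw [hc] at hx
    simp at hx
    exact hv (hx ▸ hxs)
  | step _ p c' hp hc' =>
    refine ⟨p, hp, ?_⟩
    have hcons : ancChain O F v = v :: ancChain O F p := ancChain_cons hch hp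
    have hmp : Meets O F s p := by
      obtain ⟨x, hx, hxs⟩ := hm
      rw [hcons] at hx
      rcases List.mem_cons.mp hx with rfl | hx'
      · exact absurd hxs hv
      · exact ⟨x, hx', hxs⟩
    have hj : jIdx O F s v = jIdx O F s p + 1 := by
      unfold jIdx
      rw [hcons, List.findIdx_cons]
      simp [hv]
    have hmn : mNode O F s v = mNode O F s p := by
      unfold mNode
      rw [hj, hcons, List.getD_cons_succ]
      rw [List.getD_eq_getElem?_getD, List.getElem?_eq_getElem (jIdx_lt hmp)]
      simp only [Option.getD_some]
      rw [List.getD_eq_getElem?_getD, List.getElem?_eq_getElem (jIdx_lt hmp)]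
      simp only [Option.getD_some]
    exact ⟨hmp, hj, hmn, by unfold dT; rw [hj, hmn]; omega⟩

theorem dT_zero {O : PySem.Dict String String} {F : Nat} {s v : String}
    (hch : ∀ w, PChain O w (ancChain O F w))
    (hm : Meets O F s v) (h : dT O F s v = 0) : v = s := by
  unfold dT at h
  have hj : jIdx O F s v = 0 := by omega
  have hi : (ancChain O F s).idxOf (mNode O F s v) = 0 := by omega
  have hmn : mNode O F s v = v := by
    rw [mNode_eq_getElem hm, List.getElem_eq_iff, hj, ← List.head?_eq_getElem?]
    exact ancChain_head O F v
  have hvS : v ∈ ancChain O F s := hmn ▸ mNode_mem_cS hm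
  rw [hmn] at hi
  have hlt := List.idxOf_lt_length_of_mem hvS
  have h00 : (ancChain O F s)[(ancChain O F s).idxOf v]? = some v := by
    rw [List.getElem?_eq_getElem hlt]
    simp [List.getElem_idxOf hlt]
  rw [hi, ← List.head?_eq_getElem?, ancChain_head O F s] at h00
  exact (Option.some.injEq _ _ ▸ h00).symm

theorem cS_last_index {O : PySem.Dict String String} {F : Nat} {s u : String}
    (hch : ∀ w, PChain O w (ancChain O F w)) (hndS : (ancChain O F s).Nodup)
    (hu : u ∈ ancChain O F s) (hp : (PySem.Dict.get? O u).isSome) :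
    (ancChain O F s).idxOf u + 1 < (ancChain O F s).length := by
  have hlt := List.idxOf_lt_length_of_mem hu
  by_contra hcon
  have heq : (ancChain O F s).idxOf u = (ancChain O F s).length - 1 := by omega
  have hlast := pchain_last (hch s) s
  have h1 : (ancChain O F s).getLastD s = u := by
    rw [List.getLastD_eq_getLast?, List.getLast?_eq_getElem?, ← heq]
    rw [List.getElem?_eq_getElem hlt]
    simp [List.getElem_idxOf hlt]
  rw [h1] at hlast
  rw [hlast] at hp
  cases hp

theorem edge_up {O : PySem.Dict String String} {F : Nat} {s u v : String}
    (hch : ∀ w, PChain O w (ancChain O F w)) (hndS : (ancChain O F s).Nodup)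
    (hu : PySem.Dict.get? O u = some v) (hucS : u ∈ ancChain O F s) :
    v ∈ ancChain O F s ∧ (ancChain O F s).idxOf v = (ancChain O F s).idxOf u + 1 := by
  have hlt := List.idxOf_lt_length_of_mem hucS
  have hsucc := cS_last_index hch hndS hucS (by simp [hu])
  have hg := pchain_get? (hch s) ((ancChain O F s).idxOf u) hsucc
  have hgu : (ancChain O F s).get ⟨(ancChain O F s).idxOf u, by omega⟩ = u := by
    simpa using List.getElem_idxOf hlt
  rw [hgu, hu] at hg
  have hv : v = (ancChain O F s).get ⟨(ancChain O F s).idxOf u + 1, hsucc⟩ := by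
    cases hg; rfl
  constructor
  · rw [hv]; exact List.get_mem _ _
  · rw [hv]
    simpa using hndS.idxOf_getElem _ hsucc

theorem edge_dT_child {O : PySem.Dict String String} {F : Nat} {s u v : String}
    (hch : ∀ w, PChain O w (ancChain O F w)) (hndS : (ancChain O F s).Nodup)
    (hu : PySem.Dict.get? O u = some v) (hmu : Meets O F s u) :
    Meets O F s v ∧ (dT O F s v = dT O F s u + 1 ∨ dT O F s u = dT O F s v + 1) := by
  by_cases hucS : u ∈ ancChain O F s
  · obtain ⟨hvS, hidx⟩ := edge_up hch hndS hu hucS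
    obtain ⟨_, _, hdu⟩ := dT_of_mem_cS hch hucS
    obtain ⟨_, _, hdv⟩ := dT_of_mem_cS hch hvS
    exact ⟨meets_of_mem_cS hvS, Or.inl (by omega)⟩
  · obtain ⟨p, hp, hmp, _, _, hd⟩ := off_chain_step hch hmu hucS
    rw [hu] at hp; cases hp
    exact ⟨hmp, Or.inr hd⟩

theorem pred_exists {O : PySem.Dict String String} {F : Nat} {s v : String} {k : Nat}
    (hch : ∀ w, PChain O w (ancChain O F w)) (hndS : (ancChain O F s).Nodup)
    (hm : Meets O F s v) (h : dT O F s v = k + 1) :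
    ∃ u, Meets O F s u ∧ dT O F s u = k ∧
      (PySem.Dict.get? O v = some u ∨
        (PySem.Dict.get? O u = some v ∧ u ∈ ancChain O F s)) := by
  by_cases hvS : v ∈ ancChain O F s
  · obtain ⟨_, _, hdv⟩ := dT_of_mem_cS hch hvS
    have hlt := List.idxOf_lt_length_of_mem hvS
    have hk1 : k + 1 < (ancChain O F s).length := by omega
    have hk : k < (ancChain O F s).length := by omega
    refine ⟨(ancChain O F s).get ⟨k, hk⟩, ?_, ?_, Or.inr ⟨?_, by simpa using List.get_mem (ancChain O F s) ⟨k, hk⟩⟩⟩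
    · exact meets_of_mem_cS (List.get_mem _ _)
    · obtain ⟨_, _, hdu⟩ := dT_of_mem_cS hch (List.get_mem (ancChain O F s) ⟨k, hk⟩)
      rw [hdu]
      simpa using hndS.idxOf_getElem k hk
    · have hidx : (ancChain O F s).idxOf v = k + 1 := by omega
      have hg := pchain_get? (hch s) k hk1
      rw [hg]
      congr 1
      rw [List.get_eq_getElem, List.getElem_eq_iff]
      show (ancChain O F s)[k + 1]? = some v
      rw [← hidx, List.getElem?_eq_getElem hlt]
      simp [List.getElem_idxOf hlt]
  · obtain ⟨p, hp, hmp, _, _, hd⟩ := off_chain_step hch hm hvS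
    exact ⟨p, hmp, by omega, Or.inl hp⟩

theorem not_value_not_mem {O : PySem.Dict String String} {v w : String} {c : List String}
    (hc : PChain O v c) (hvw : v ≠ w) (hw : ∀ x, PySem.Dict.get? O x ≠ some w) :
    w ∉ c := by
  induction hc with
  | root u hu => simpa using fun h => hvw h.symm
  | step u p c hp hcp ih =>
    have hpw : p ≠ w := fun h => hw u (h ▸ hp)
    simp only [List.mem_cons, not_or]
    exact ⟨fun h => hvw h.symm, ih hpw⟩

theorem pchain_dropLast_keys {O : PySem.Dict String String} {v : String} {c : List String}
    (hc : PChain O v c) : ∀ x ∈ c.dropLast, (PySem.Dict.get? O x).isSome := by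
  induction hc with
  | root u hu => simp
  | step u p c hp hcp ih =>
    intro x hx
    have hne := pchain_ne_nil hcp
    rw [List.dropLast_cons_of_ne_nil hne] at hx
    rcases List.mem_cons.mp hx with rfl | hx'
    · simp [hp]
    · exact ih x hx'

theorem pchain_length_le {O : PySem.Dict String String} {v : String} {c : List String}
    (hc : PChain O v c) (hnd : c.Nodup) :
    c.length ≤ (PySem.Dict.keys O).length + 1 := by
  have hsub : c.dropLast ⊆ PySem.Dict.keys O := by
    intro x hx
    rw [pv_mem_keys_iff]
    exact pchain_dropLast_keys hc x hx
  have hndd : c.dropLast.Nodup := hnd.sublist (List.dropLast_sublist c)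
  have := (List.subperm_of_subset hndd hsub).length_le
  have hlen : c.dropLast.length = c.length - 1 := List.length_dropLast
  have hne : c ≠ [] := pchain_ne_nil hc
  have : 0 < c.length := List.length_pos_of_ne_nil hne
  omega

-- ---------- characterizing one BFS level (the two folds) ----------
def Nbr (O : PySem.Dict String String) (D : PySem.Dict String (List String))
    (u v : String) : Prop :=
  PySem.Dict.get? O u = some v ∨ v ∈ (PySem.Dict.get? D u).getD []

theorem foldAdd_char (l : List String)
    (acc : PySem.Dict String Int × PySem.Dict String Int)
    (vis0 : PySem.Dict String Int)
    (hinv : ∀ x, (PySem.Dict.get? acc.2 x).isSome ↔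
      (PySem.Dict.get? vis0 x).isSome ∨ (PySem.Dict.get? acc.1 x).isSome) :
    (∀ x, (PySem.Dict.get? (l.foldl bfsAdd acc).1 x).isSome ↔
      (PySem.Dict.get? acc.1 x).isSome ∨ (x ∈ l ∧ ¬ (PySem.Dict.get? vis0 x).isSome)) ∧
    (∀ x, (PySem.Dict.get? (l.foldl bfsAdd acc).2 x).isSome ↔
      (PySem.Dict.get? vis0 x).isSome ∨ (PySem.Dict.get? (l.foldl bfsAdd acc).1 x).isSome) := by
  induction l generalizing acc with
  | nil => exact ⟨fun x => by simp, hinv⟩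
  | cons t l ih =>
    simp only [List.foldl_cons]
    cases h2 : PySem.Dict.get? acc.2 t with
    | some w =>
      have hstep : bfsAdd acc t = acc := by simp [bfsAdd, h2]
      rw [hstep]
      obtain ⟨ha, hb⟩ := ih acc hinv
      have ht := (hinv t).mp (by simp [h2])
      refine ⟨fun x => ?_, hb⟩
      rw [ha x]
      by_cases hx : x = t
      · subst hx; simp only [List.mem_cons]; tauto
      · simp only [List.mem_cons]; tauto
    | none =>
      have hstep : bfsAdd acc t =
          (PySem.Dict.insert acc.1 t 1, PySem.Dict.insert acc.2 t 1) := by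
        simp [bfsAdd, h2]
      rw [hstep]
      have htv : ¬ (PySem.Dict.get? vis0 t).isSome ∧ ¬ (PySem.Dict.get? acc.1 t).isSome := by
        have h3 := hinv t
        rw [h2] at h3
        simp at h3
        simp [h3.1, h3.2]
      have hinv' : ∀ x, (PySem.Dict.get? (PySem.Dict.insert acc.2 t 1) x).isSome ↔
          (PySem.Dict.get? vis0 x).isSome ∨
          (PySem.Dict.get? (PySem.Dict.insert acc.1 t 1) x).isSome := by
        intro x
        by_cases hx : x = t
        · subst hx; simp [PySem.Dict.get?_insert]
        · simp [PySem.Dict.get?_insert, hx, hinv x]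
      obtain ⟨ha, hb⟩ := ih (PySem.Dict.insert acc.1 t 1, PySem.Dict.insert acc.2 t 1) hinv'
      refine ⟨fun x => ?_, hb⟩
      rw [ha x]
      by_cases hx : x = t
      · subst hx
        have hv0 : PySem.Dict.get? vis0 x = none := by
          cases hvv : PySem.Dict.get? vis0 x with
          | none => rfl
          | some w => exact absurd (by simp [hvv]) htv.1
        simp [PySem.Dict.get?_insert, List.mem_cons, hv0]
      · simp [PySem.Dict.get?_insert, hx, List.mem_cons]

theorem bfsVisit_char (O : PySem.Dict String String) (D : PySem.Dict String (List String))
    (s : String) (acc : PySem.Dict String Int × PySem.Dict String Int)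
    (vis0 : PySem.Dict String Int)
    (hinv : ∀ x, (PySem.Dict.get? acc.2 x).isSome ↔
      (PySem.Dict.get? vis0 x).isSome ∨ (PySem.Dict.get? acc.1 x).isSome) :
    (∀ x, (PySem.Dict.get? (bfsVisit O D acc s).1 x).isSome ↔
      (PySem.Dict.get? acc.1 x).isSome ∨ (Nbr O D s x ∧ ¬ (PySem.Dict.get? vis0 x).isSome)) ∧
    (∀ x, (PySem.Dict.get? (bfsVisit O D acc s).2 x).isSome ↔
      (PySem.Dict.get? vis0 x).isSome ∨ (PySem.Dict.get? (bfsVisit O D acc s).1 x).isSome) := by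
  have hone : ∀ (t : String) (a : PySem.Dict String Int × PySem.Dict String Int),
      bfsAdd a t = [t].foldl bfsAdd a := fun _ _ => rfl
  cases hOs : PySem.Dict.get? O s with
  | some t =>
    cases hDs : PySem.Dict.get? D s with
    | some l =>
      have hred : bfsVisit O D acc s = l.foldl bfsAdd (bfsAdd acc t) := by
        simp [bfsVisit, hOs, hDs]
      rw [hred, hone t acc]
      obtain ⟨h1a, h1b⟩ := foldAdd_char [t] acc vis0 hinv
      obtain ⟨h2a, h2b⟩ := foldAdd_char l _ vis0 h1b
      refine ⟨fun x => ?_, h2b⟩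
      rw [h2a x, h1a x]
      simp only [Nbr, hOs, hDs, Option.getD_some, List.mem_singleton, Option.some.injEq]
      tauto
    | none =>
      have hred : bfsVisit O D acc s = bfsAdd acc t := by
        simp [bfsVisit, hOs, hDs]
      rw [hred, hone t acc]
      obtain ⟨h1a, h1b⟩ := foldAdd_char [t] acc vis0 hinv
      refine ⟨fun x => ?_, h1b⟩
      rw [h1a x]
      simp only [Nbr, hOs, hDs, Option.getD_none, List.mem_singleton, Option.some.injEq,
        List.not_mem_nil]
      tauto
  | none =>
    cases hDs : PySem.Dict.get? D s with
    | some l =>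
      have hred : bfsVisit O D acc s = l.foldl bfsAdd acc := by
        simp [bfsVisit, hOs, hDs]
      rw [hred]
      obtain ⟨h2a, h2b⟩ := foldAdd_char l acc vis0 hinv
      refine ⟨fun x => ?_, h2b⟩
      rw [h2a x]
      simp only [Nbr, hOs, hDs, Option.getD_some]
      tauto
    | none =>
      have hred : bfsVisit O D acc s = acc := by
        simp [bfsVisit, hOs, hDs]
      rw [hred]
      refine ⟨fun x => ?_, hinv⟩
      simp only [Nbr, hOs, hDs, Option.getD_none, List.not_mem_nil]
      tauto

theorem foldVisit_char (O : PySem.Dict String String) (D : PySem.Dict String (List String))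
    (states : List String) (acc : PySem.Dict String Int × PySem.Dict String Int)
    (vis0 : PySem.Dict String Int)
    (hinv : ∀ x, (PySem.Dict.get? acc.2 x).isSome ↔
      (PySem.Dict.get? vis0 x).isSome ∨ (PySem.Dict.get? acc.1 x).isSome) :
    (∀ x, (PySem.Dict.get? (states.foldl (bfsVisit O D) acc).1 x).isSome ↔
      (PySem.Dict.get? acc.1 x).isSome ∨
      ((∃ u ∈ states, Nbr O D u x) ∧ ¬ (PySem.Dict.get? vis0 x).isSome)) ∧
    (∀ x, (PySem.Dict.get? (states.foldl (bfsVisit O D) acc).2 x).isSome ↔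
      (PySem.Dict.get? vis0 x).isSome ∨
      (PySem.Dict.get? (states.foldl (bfsVisit O D) acc).1 x).isSome) := by
  induction states generalizing acc with
  | nil => exact ⟨fun x => by simp, hinv⟩
  | cons s states ih =>
    simp only [List.foldl_cons]
    obtain ⟨h1a, h1b⟩ := bfsVisit_char O D s acc vis0 hinv
    obtain ⟨h2a, h2b⟩ := ih _ h1b
    refine ⟨fun x => ?_, h2b⟩
    rw [h2a x, h1a x]
    constructor
    · rintro ((h | h) | h)
      · exact Or.inl h
      · exact Or.inr ⟨⟨s, by simp, h.1⟩, h.2⟩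
      · obtain ⟨⟨u, hu, hn⟩, hv⟩ := h
        exact Or.inr ⟨⟨u, by simp [hu], hn⟩, hv⟩
    · rintro (h | ⟨⟨u, hu, hn⟩, hv⟩)
      · exact Or.inl (Or.inl h)
      · rcases List.mem_cons.mp hu with rfl | hu'
        · exact Or.inl (Or.inr ⟨hn, hv⟩)
        · exact Or.inr ⟨⟨u, hu', hn⟩, hv⟩

-- ---------- one BFS level in terms of the tree distance ----------
theorem nbr_iff {O : PySem.Dict String String} {D : PySem.Dict String (List String)}
    (hcons1 : ∀ u v, PySem.Dict.get? O u = some v → u ∈ (PySem.Dict.get? D v).getD [])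
    (hcons2 : ∀ u v, v ∈ (PySem.Dict.get? D u).getD [] → PySem.Dict.get? O v = some u)
    (u v : String) :
    Nbr O D u v ↔ (PySem.Dict.get? O u = some v ∨ PySem.Dict.get? O v = some u) := by
  unfold Nbr
  constructor
  · rintro (h | h)
    · exact Or.inl h
    · exact Or.inr (hcons2 u v h)
  · rintro (h | h)
    · exact Or.inl h
    · exact Or.inr (hcons1 v u h)

theorem blk_not_mem_chain {O : PySem.Dict String String} {F : Nat} {s w : String}
    (hch : ∀ x, PChain O x (ancChain O F x))
    (hw : ∀ x, PySem.Dict.get? O x ≠ some w) (hs : s ≠ w) :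
    w ∉ ancChain O F s :=
  not_value_not_mem (hch s) (fun h => hs h) hw

theorem dT_self {O : PySem.Dict String String} {F : Nat} {s : String}
    (hch : ∀ w, PChain O w (ancChain O F w)) : dT O F s s = 0 := by
  obtain ⟨_, _, h⟩ := dT_of_mem_cS hch (ancChain_self_mem O F s)
  rw [h]
  have hh := ancChain_head O F s
  cases hcc : ancChain O F s with
  | nil => rw [hcc] at hh; cases hh
  | cons a l => rw [hcc] at hh; simp at hh; subst hh; simp

theorem bfs_step_char {O : PySem.Dict String String} {D : PySem.Dict String (List String)}
    {F : Nat} {s e : String} {k : Nat} {states : List String}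
    {visited : PySem.Dict String Int}
    (hch : ∀ w, PChain O w (ancChain O F w)) (hndS : (ancChain O F s).Nodup)
    (hcons1 : ∀ u v, PySem.Dict.get? O u = some v → u ∈ (PySem.Dict.get? D v).getD [])
    (hcons2 : ∀ u v, v ∈ (PySem.Dict.get? D u).getD [] → PySem.Dict.get? O v = some u)
    (hbY : ∀ x, PySem.Dict.get? O x ≠ some "YOU")
    (hbS : ∀ x, PySem.Dict.get? O x ≠ some "SAN")
    (hYs : PySem.Dict.get? O "YOU" = some s)
    (hIst : ∀ v, v ∈ states ↔ (Meets O F s v ∧ dT O F s v = k ∧ v ≠ "YOU" ∧ v ≠ "SAN"))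
    (hIvis : ∀ v, (PySem.Dict.get? visited v).isSome ↔
      (v = "YOU" ∨ v = "SAN" ∨ (Meets O F s v ∧ dT O F s v ≤ k))) :
    (∀ v, (PySem.Dict.get? (states.foldl (bfsVisit O D) (PySem.Dict.empty, visited)).1 v).isSome ↔
      (Meets O F s v ∧ dT O F s v = k + 1 ∧ v ≠ "YOU" ∧ v ≠ "SAN")) ∧
    (∀ v, (PySem.Dict.get? (states.foldl (bfsVisit O D) (PySem.Dict.empty, visited)).2 v).isSome ↔
      (v = "YOU" ∨ v = "SAN" ∨ (Meets O F s v ∧ dT O F s v ≤ k + 1))) := by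
  have hinv0 : ∀ x, (PySem.Dict.get? ((PySem.Dict.empty, visited) :
      PySem.Dict String Int × PySem.Dict String Int).2 x).isSome ↔
      (PySem.Dict.get? visited x).isSome ∨
      (PySem.Dict.get? ((PySem.Dict.empty, visited) :
        PySem.Dict String Int × PySem.Dict String Int).1 x).isSome := by
    intro x; simp [PySem.Dict.get?_empty]
  obtain ⟨hns, hvis⟩ := foldVisit_char O D states (PySem.Dict.empty, visited) visited hinv0
  have hnsiff : ∀ v, (PySem.Dict.get? (states.foldl (bfsVisit O D)
      (PySem.Dict.empty, visited)).1 v).isSome ↔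
      (Meets O F s v ∧ dT O F s v = k + 1 ∧ v ≠ "YOU" ∧ v ≠ "SAN") := by
    intro v
    rw [hns v]
    simp only [PySem.Dict.get?_empty, Option.isSome_none, Bool.false_eq_true, false_or]
    constructor
    · rintro ⟨⟨u, hu, hnbr⟩, hnv⟩
      obtain ⟨hmu, hdu, huY, huS⟩ := (hIst u).mp hu
      have hnv' := (fun h => hnv ((hIvis v).mpr h))
      have hvY : v ≠ "YOU" := fun h => hnv' (Or.inl h)
      have hvS : v ≠ "SAN" := fun h => hnv' (Or.inr (Or.inl h))
      have hedge := (nbr_iff hcons1 hcons2 u v).mp hnbr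
      have hmd : Meets O F s v ∧ (dT O F s v = dT O F s u + 1 ∨ dT O F s u = dT O F s v + 1) := by
        rcases hedge with h | h
        · exact edge_dT_child hch hndS h hmu
        · have hcons := ancChain_cons hch h
          have hmv : Meets O F s v := by
            obtain ⟨x, hx, hxs⟩ := hmu
            exact ⟨x, hcons ▸ List.mem_cons_of_mem v hx, hxs⟩
          obtain ⟨_, hor⟩ := edge_dT_child hch hndS h hmv
          exact ⟨hmv, hor.symm⟩
      obtain ⟨hmv, hor⟩ := hmd
      refine ⟨hmv, ?_, hvY, hvS⟩
      rcases hor with h | h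
      · omega
      · exfalso
        exact hnv' (Or.inr (Or.inr ⟨hmv, by omega⟩))
    · rintro ⟨hmv, hdv, hvY, hvS⟩
      obtain ⟨u, hmu, hdu, hedge⟩ := pred_exists hch hndS hmv hdv
      have huY : u ≠ "YOU" := by
        rintro rfl
        rcases hedge with h | ⟨h, hmem⟩
        · exact hbY v h
        · rw [hYs] at h
          cases h
          have := dT_self (s := s) hch
          omega
      have huS : u ≠ "SAN" := by
        rintro rfl
        rcases hedge with h | ⟨h, hmem⟩
        · exact hbS v h
        · exact blk_not_mem_chain hch hbS
            (fun hs0 => hbS "YOU" (hs0 ▸ hYs)) hmem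
      refine ⟨⟨u, (hIst u).mpr ⟨hmu, hdu, huY, huS⟩, ?_⟩, ?_⟩
      · rw [nbr_iff hcons1 hcons2]
        rcases hedge with h | ⟨h, _⟩
        · exact Or.inr h
        · exact Or.inl h
      · intro hvis0
        rcases (hIvis v).mp hvis0 with h | h | ⟨_, h⟩
        · exact hvY h
        · exact hvS h
        · omega
  refine ⟨hnsiff, fun v => ?_⟩
  rw [hvis v, hnsiff v]
  rw [hIvis v]
  constructor
  · rintro ((h | h | ⟨hm, hd⟩) | ⟨hm, hd, _⟩)
    · exact Or.inl h
    · exact Or.inr (Or.inl h)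
    · exact Or.inr (Or.inr ⟨hm, by omega⟩)
    · exact Or.inr (Or.inr ⟨hm, by omega⟩)
  · rintro (h | h | ⟨hm, hd⟩)
    · exact Or.inl (Or.inl h)
    · exact Or.inl (Or.inr (Or.inl h))
    · by_cases hk : dT O F s v ≤ k
      · exact Or.inl (Or.inr (Or.inr ⟨hm, hk⟩))
      · by_cases hY : v = "YOU"
        · exact Or.inl (Or.inl hY)
        · by_cases hS : v = "SAN"
          · exact Or.inl (Or.inr (Or.inl hS))
          · exact Or.inr ⟨hm, by omega, hY, hS⟩

-- ---------- the BFS loop returns the tree distance ----------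
theorem loop_correct {O : PySem.Dict String String} {D : PySem.Dict String (List String)}
    {F : Nat} {s e : String}
    (hch : ∀ w, PChain O w (ancChain O F w)) (hndS : (ancChain O F s).Nodup)
    (hcons1 : ∀ u v, PySem.Dict.get? O u = some v → u ∈ (PySem.Dict.get? D v).getD [])
    (hcons2 : ∀ u v, v ∈ (PySem.Dict.get? D u).getD [] → PySem.Dict.get? O v = some u)
    (hbY : ∀ x, PySem.Dict.get? O x ≠ some "YOU")
    (hbS : ∀ x, PySem.Dict.get? O x ≠ some "SAN")
    (hYs : PySem.Dict.get? O "YOU" = some s)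
    (hme : Meets O F s e) (heY : e ≠ "YOU") (heS : e ≠ "SAN") :
    ∀ (fuel k : Nat) (states : List String) (visited : PySem.Dict String Int),
    (∀ v, v ∈ states ↔ (Meets O F s v ∧ dT O F s v = k ∧ v ≠ "YOU" ∧ v ≠ "SAN")) →
    (∀ v, (PySem.Dict.get? visited v).isSome ↔
      (v = "YOU" ∨ v = "SAN" ∨ (Meets O F s v ∧ dT O F s v ≤ k))) →
    k < dT O F s e → dT O F s e ≤ k + fuel →
    part2Loop O D e fuel states visited (k : Int) = (dT O F s e : Int) := by
  intro fuel
  induction fuel with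
  | zero => intro k states visited _ _ hk hfuel; omega
  | succ fuel ih =>
    intro k states visited hIst hIvis hk hfuel
    obtain ⟨hns, hvis⟩ := bfs_step_char (e := e) hch hndS hcons1 hcons2 hbY hbS hYs hIst hIvis
    rw [part2Loop]
    by_cases hbreak : dT O F s e = k + 1
    · rw [if_pos (by rw [hns e]; exact ⟨hme, hbreak, heY, heS⟩)]
      omega
    · rw [if_neg (by
        rw [hns e]
        rintro ⟨_, hd, _, _⟩
        exact hbreak hd)]
      have hrec := ih (k+1) (PySem.Dict.keys
          (states.foldl (bfsVisit O D) (PySem.Dict.empty, visited)).1)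
          (states.foldl (bfsVisit O D) (PySem.Dict.empty, visited)).2
          (fun v => by rw [pv_mem_keys_iff]; exact hns v) hvis (by omega) (by omega)
      have hcast : ((k : Int) + 1) = ((k+1 : Nat) : Int) := by push_cast; ring
      rw [hcast, hrec]

-- ---------- B's first loop builds the distance table of s's chain ----------
theorem buildDist_preserve (O : PySem.Dict String String) :
    ∀ (fuel : Nat) (n : Option String) (d : Int) (dist : PySem.Dict String Int)
      (x : String) (w : Int), PySem.Dict.get? dist x = some w →
      PySem.Dict.get? (buildDist O fuel n d dist) x = some w := by
  intro fuel
  induction fuel with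
  | zero => intro n d dist x w h; cases n <;> simpa [buildDist]
  | succ fuel ih =>
    intro n d dist x w h
    cases n with
    | none => simpa [buildDist]
    | some v =>
      rw [buildDist]
      by_cases hv : (PySem.Dict.get? dist v).isSome
      · rw [if_pos hv]; exact h
      · rw [if_neg hv]
        apply ih
        have hxv : x ≠ v := by
          rintro rfl
          rw [h] at hv
          simp at hv
        rw [PySem.Dict.get?_insert]
        simp [hxv, h]

theorem buildDist_chain {O : PySem.Dict String String} {v : String} {c : List String}
    (hc : PChain O v c) (hnd : c.Nodup) :
    ∀ (fuel : Nat) (d : Int) (dist : PySem.Dict String Int),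
    (∀ x ∈ c, PySem.Dict.get? dist x = none) → c.length ≤ fuel →
    (∀ x ∈ c, PySem.Dict.get? (buildDist O fuel (some v) d dist) x
        = some (d + (c.idxOf x : Int))) ∧
    (∀ x, x ∉ c → PySem.Dict.get? (buildDist O fuel (some v) d dist) x
        = PySem.Dict.get? dist x) := by
  induction hc with
  | root u hu =>
    intro fuel d dist hnone hlen
    cases fuel with
    | zero => simp at hlen
    | succ fuel =>
      rw [buildDist]
      rw [if_neg (by rw [hnone u (by simp)]; simp)]
      rw [hu]
      have hred : ∀ dd, buildDist O fuel none (d+1) dd = dd := by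
        intro dd; cases fuel <;> rfl
      rw [hred]
      constructor
      · intro x hx
        simp at hx
        subst hx
        simp [PySem.Dict.get?_insert]
      · intro x hx
        simp at hx
        rw [PySem.Dict.get?_insert]
        simp [hx]
  | step u p c hp hcp ih =>
    intro fuel d dist hnone hlen
    cases fuel with
    | zero => simp at hlen
    | succ fuel =>
      rw [buildDist]
      rw [if_neg (by rw [hnone u (by simp)]; simp)]
      rw [hp]
      have hnd' : c.Nodup := hnd.of_cons
      have hunc : u ∉ c := by simp at hnd; exact hnd.1
      have hnone' : ∀ x ∈ c, PySem.Dict.get? (PySem.Dict.insert dist u d) x = none := by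
        intro x hx
        have hxu : x ≠ u := fun h => hunc (h ▸ hx)
        rw [PySem.Dict.get?_insert]
        simp [hxu]
        exact hnone x (by simp [hx])
      have hlen' : c.length ≤ fuel := by simp at hlen; omega
      obtain ⟨ha, hb⟩ := ih hnd' fuel (d+1) (PySem.Dict.insert dist u d) hnone' hlen'
      constructor
      · intro x hx
        rcases List.mem_cons.mp hx with rfl | hx'
        · rw [hb x hunc, PySem.Dict.get?_insert]
          simp
        · rw [ha x hx']
          have hxu : x ≠ u := fun h => hunc (h ▸ hx')
          have : (u :: c).idxOf x = c.idxOf x + 1 := List.idxOf_cons_ne c (fun h => hxu h.symm)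
          rw [this]
          push_cast
          ring_nf
      · intro x hx
        have hxu : x ≠ u := by rintro rfl; exact hx (by simp)
        have hxc : x ∉ c := fun h => hx (by simp [h])
        rw [hb x hxc, PySem.Dict.get?_insert]
        simp [hxu]

-- ---------- B's second loop walks up to the meeting point ----------
theorem walkUp_correct {O : PySem.Dict String String} {F : Nat} {s : String}
    {dist : PySem.Dict String Int}
    (hch : ∀ w, PChain O w (ancChain O F w))
    (hdin : ∀ x, x ∈ ancChain O F s →
      PySem.Dict.get? dist x = some ((ancChain O F s).idxOf x : Int))
    (hdout : ∀ x, x ∉ ancChain O F s → PySem.Dict.get? dist x = none) :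
    ∀ (fuel : Nat) (v : String) (steps : Int), Meets O F s v →
    jIdx O F s v ≤ fuel →
    walkUp O dist fuel v steps = steps + (dT O F s v : Int) := by
  intro fuel
  induction fuel with
  | zero =>
    intro v steps hm hj
    by_cases hv : v ∈ ancChain O F s
    · obtain ⟨_, _, hd⟩ := dT_of_mem_cS hch hv
      simp [walkUp, hdin v hv, hd]
    · obtain ⟨p, hp, hmp, hjv, _, _⟩ := off_chain_step hch hm hv
      omega
  | succ fuel ih =>
    intro v steps hm hj
    by_cases hv : v ∈ ancChain O F s
    · obtain ⟨_, _, hd⟩ := dT_of_mem_cS hch hv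
      simp [walkUp, hdin v hv, hd]
    · obtain ⟨p, hp, hmp, hjv, _, hdv⟩ := off_chain_step hch hm hv
      have hred : walkUp O dist (fuel+1) v steps = walkUp O dist fuel p (steps + 1) := by
        simp [walkUp, hdout v hv, hp]
      rw [hred, ih p (steps + 1) hmp (by omega), hdv]
      push_cast
      ring

-- ---------- assembly helpers ----------
theorem ancChain_nonkey {O : PySem.Dict String String} {v : String}
    (h : PySem.Dict.get? O v = none) (F : Nat) : ancChain O F v = [v] := by
  cases F with
  | zero => rfl
  | succ f => simp [ancChain, h]

theorem walkUp_found {O : PySem.Dict String String} {dist : PySem.Dict String Int}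
    {n : String} {dv : Int} (h : PySem.Dict.get? dist n = some dv) :
    ∀ (fuel : Nat) (steps : Int), walkUp O dist fuel n steps = steps + dv := by
  intro fuel steps
  cases fuel <;> simp [walkUp, h]

theorem get?_vis0 (s0 v : String) :
    PySem.Dict.get? (PySem.Dict.insert (PySem.Dict.insert
      (PySem.Dict.insert (PySem.Dict.empty (κ := String) (ν := Int)) s0 1) "YOU" 1) "SAN" 1) v
    = if v = "SAN" ∨ v = "YOU" ∨ v = s0 then some 1 else none := by
  rw [PySem.Dict.get?_insert, PySem.Dict.get?_insert, PySem.Dict.get?_insert]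
  by_cases h1 : v = "SAN" <;> by_cases h2 : v = "YOU" <;> by_cases h3 : v = s0 <;>
    simp [h1, h2, h3, PySem.Dict.get?_empty]

theorem mem_map_snd_of_get? {orbits : List (String × String)} {x w : String}
    (h : PySem.Dict.get? (PySem.Dict.mk orbits) x = some w) : w ∈ orbits.map Prod.snd := by
  have := PySem.Dict.mem_items_of_get?_eq_some _ h
  exact List.mem_map.mpr ⟨(x, w), this, rfl⟩

theorem mem_map_fst_of_get? {orbits : List (String × String)} {x w : String}
    (h : PySem.Dict.get? (PySem.Dict.mk orbits) x = some w) : x ∈ orbits.map Prod.fst := by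
  have := PySem.Dict.mem_items_of_get?_eq_some _ h
  exact List.mem_map.mpr ⟨(x, w), this, rfl⟩

-- the two dead-fuel cases of buildDist are irrelevant: one unfold
theorem buildDist_succ (O : PySem.Dict String String) (fuel : Nat) (n : String) (d : Int)
    (dist : PySem.Dict String Int) (h : PySem.Dict.get? dist n = none) :
    buildDist O (fuel+1) (some n) d dist
      = buildDist O fuel (PySem.Dict.get? O n) (d+1) (PySem.Dict.insert dist n d) := by
  rw [buildDist, if_neg (by simp [h])]

theorem part2Loop_succ (O : PySem.Dict String String) (D : PySem.Dict String (List String))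
    (e : String) (fuel : Nat) (states : List String) (visited : PySem.Dict String Int)
    (moves : Int) :
    part2Loop O D e (fuel+1) states visited moves =
      (if (PySem.Dict.get? (states.foldl (bfsVisit O D) (PySem.Dict.empty, visited)).1 e).isSome
       then moves + 1
       else part2Loop O D e fuel
         (PySem.Dict.keys (states.foldl (bfsVisit O D) (PySem.Dict.empty, visited)).1)
         (states.foldl (bfsVisit O D) (PySem.Dict.empty, visited)).2 (moves + 1)) := rfl

-- ===== VERDICT (by name: the statement is the Claim_ definition above) =====
theorem part2_spec : Claim_equal_part2 := by
  intro orbits orbited hdom hpre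
  unfold Spec_part2
  obtain ⟨⟨hY0, hS0⟩, hrest⟩ := hpre
  cases hY : PySem.Dict.get? (PySem.Dict.mk orbits) "YOU" with
  | none => rw [hY] at hY0; simp at hY0
  | some s0 =>
  cases hS : PySem.Dict.get? (PySem.Dict.mk orbits) "SAN" with
  | none => rw [hS] at hS0; simp at hS0
  | some e0 =>
  simp only [hY, hS, Option.getD_some] at hrest
  have hAeq : part2 orbits orbited
      = if s0 = e0 then 0
        else part2Loop (PySem.Dict.mk orbits) (PySem.Dict.mk orbited) e0
          (2 * orbits.length + 2) [s0]
          (PySem.Dict.insert (PySem.Dict.insert (PySem.Dict.insert PySem.Dict.empty s0 (1 : Int))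
            "YOU" 1) "SAN" 1) 0 := by
    simp only [part2, hY, hS]
  have hBeq : part2_alt orbits orbited
      = walkUp (PySem.Dict.mk orbits)
          (buildDist (PySem.Dict.mk orbits) (orbits.length + 2) (some s0) 0 PySem.Dict.empty)
          orbits.length e0 0 := by
    simp only [part2_alt, hY, hS]
  have hd0 : PySem.Dict.get?
      (buildDist (PySem.Dict.mk orbits) (orbits.length + 2) (some s0) 0 PySem.Dict.empty) s0
      = some 0 := by
    rw [show orbits.length + 2 = (orbits.length + 1) + 1 from rfl,
      buildDist_succ _ _ _ _ _ (by simp)]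
    exact buildDist_preserve _ _ _ _ _ _ _ (PySem.Dict.get?_insert_self _ _ _)
  by_cases hse : s0 = e0
  · rw [hAeq, hBeq, if_pos hse, ← hse, walkUp_found hd0]
    norm_num
  · have hes : e0 ≠ s0 := fun h => hse h.symm
    rcases hrest with heq | hedge | hWF
    · exact absurd heq hse
    · -- SAN's parent is YOU's grandparent: one BFS level
      obtain ⟨hOs, heY, heS, _⟩ := hedge
      have hvisE : PySem.Dict.get? (PySem.Dict.insert (PySem.Dict.insert
          (PySem.Dict.insert PySem.Dict.empty s0 (1 : Int)) "YOU" 1) "SAN" 1) e0 = none := by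
        rw [get?_vis0 s0 e0]
        simp [heY, heS, hes]
      have hinv0 : ∀ x, (PySem.Dict.get? ((PySem.Dict.empty, PySem.Dict.insert (PySem.Dict.insert
          (PySem.Dict.insert PySem.Dict.empty s0 (1 : Int)) "YOU" 1) "SAN" 1) :
            PySem.Dict String Int × PySem.Dict String Int).2 x).isSome ↔
          (PySem.Dict.get? (PySem.Dict.insert (PySem.Dict.insert
            (PySem.Dict.insert PySem.Dict.empty s0 (1 : Int)) "YOU" 1) "SAN" 1) x).isSome ∨
          (PySem.Dict.get? ((PySem.Dict.empty, PySem.Dict.insert (PySem.Dict.insert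
            (PySem.Dict.insert PySem.Dict.empty s0 (1 : Int)) "YOU" 1) "SAN" 1) :
              PySem.Dict String Int × PySem.Dict String Int).1 x).isSome := by
        intro x; simp [PySem.Dict.get?_empty]
      obtain ⟨hb1, _⟩ := bfsVisit_char (PySem.Dict.mk orbits) (PySem.Dict.mk orbited) s0 _ _ hinv0
      have hfound : (PySem.Dict.get? ([s0].foldl
          (bfsVisit (PySem.Dict.mk orbits) (PySem.Dict.mk orbited))
          (PySem.Dict.empty, PySem.Dict.insert (PySem.Dict.insert
            (PySem.Dict.insert PySem.Dict.empty s0 (1 : Int)) "YOU" 1) "SAN" 1)).1 e0).isSome := by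
      
        simp only [List.foldl_cons, List.foldl_nil]
        rw [hb1 e0]
        right
        exact ⟨Or.inl hOs, by simp [hvisE]⟩
      have hA1 : part2Loop (PySem.Dict.mk orbits) (PySem.Dict.mk orbited) e0
          (2 * orbits.length + 2) [s0]
          (PySem.Dict.insert (PySem.Dict.insert (PySem.Dict.insert PySem.Dict.empty s0 (1 : Int))
            "YOU" 1) "SAN" 1) 0 = 0 + 1 := by
        rw [show 2 * orbits.length + 2 = (2 * orbits.length + 1) + 1 from rfl, part2Loop_succ,
          if_pos hfound]
      have hd1 : PySem.Dict.get?
          (buildDist (PySem.Dict.mk orbits) (orbits.length + 2) (some s0) 0 PySem.Dict.empty) e0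
          = some 1 := by
        rw [show orbits.length + 2 = (orbits.length + 1) + 1 from rfl,
          buildDist_succ _ _ _ _ _ (by simp), hOs,
          buildDist_succ _ _ _ _ _ (by rw [PySem.Dict.get?_insert]; simp [hes])]
        exact buildDist_preserve _ _ _ _ _ _ _ (PySem.Dict.get?_insert_self _ _ _)
      rw [hAeq, if_neg hse, hBeq, hA1, walkUp_found hd1]
    · -- well-formed orbit map: BFS level count = chain distance
      obtain ⟨hW1a, hW1b, hW2, hW4Y, hW4S, hW3⟩ := hWF
      have hch : ∀ v, PChain (PySem.Dict.mk orbits) v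
          (ancChain (PySem.Dict.mk orbits) (orbits.length + 1) v) := by
        intro v
        cases hv : PySem.Dict.get? (PySem.Dict.mk orbits) v with
        | none => rw [ancChain_nonkey hv]; exact PChain.root v hv
        | some w =>
          exact pchain_ancChain _ _ _ (hW2 v (mem_map_fst_of_get? hv)).2
      have hndAll : ∀ v, (ancChain (PySem.Dict.mk orbits) (orbits.length + 1) v).Nodup := by
        intro v
        cases hv : PySem.Dict.get? (PySem.Dict.mk orbits) v with
        | none => rw [ancChain_nonkey hv]; simp
        | some w => exact (hW2 v (mem_map_fst_of_get? hv)).1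
      have hbY : ∀ x, PySem.Dict.get? (PySem.Dict.mk orbits) x ≠ some "YOU" :=
        fun x h => hW4Y (mem_map_snd_of_get? h)
      have hbS : ∀ x, PySem.Dict.get? (PySem.Dict.mk orbits) x ≠ some "SAN" :=
        fun x h => hW4S (mem_map_snd_of_get? h)
      have hsY : s0 ≠ "YOU" := fun h => hbY "YOU" (h ▸ hY)
      have hsS : s0 ≠ "SAN" := fun h => hbS "YOU" (h ▸ hY)
      have heY : e0 ≠ "YOU" := fun h => hbY "SAN" (h ▸ hS)
      have heS : e0 ≠ "SAN" := fun h => hbS "SAN" (h ▸ hS)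
      have hcons1 : ∀ u v, PySem.Dict.get? (PySem.Dict.mk orbits) u = some v →
          u ∈ (PySem.Dict.get? (PySem.Dict.mk orbited) v).getD [] := by
        intro u v h
        have hu := hW1a u (mem_map_fst_of_get? h)
        rw [PySem.Dict.getD_eq_get?_getD, PySem.Dict.getD_of_get?_eq_some _ _ h] at hu
        rw [← PySem.Dict.getD_eq_get?_getD]
        exact hu
      have hcons2 : ∀ u v, v ∈ (PySem.Dict.get? (PySem.Dict.mk orbited) u).getD [] →
          PySem.Dict.get? (PySem.Dict.mk orbits) v = some u := by
        intro u v hv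
        cases hDu : PySem.Dict.get? (PySem.Dict.mk orbited) u with
        | none => rw [hDu] at hv; simp at hv
        | some l =>
          have huk : u ∈ orbited.map Prod.fst := by
            have h1 : (PySem.Dict.get? (PySem.Dict.mk orbited) u).isSome := by simp [hDu]
            rw [← pv_mem_keys_iff] at h1
            simpa [PySem.Dict.keys] using h1
          refine hW1b u huk v ?_
          rw [PySem.Dict.getD_eq_get?_getD, hDu]
          rw [hDu] at hv
          exact hv
      have hme : Meets (PySem.Dict.mk orbits) (orbits.length + 1) s0 e0 := by
        obtain ⟨x, hx1, hx2⟩ := hW3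
        exact ⟨x, hx2, hx1⟩
      have hL1 : 0 < dT (PySem.Dict.mk orbits) (orbits.length + 1) s0 e0 := by
        rcases Nat.eq_zero_or_pos (dT (PySem.Dict.mk orbits) (orbits.length + 1) s0 e0) with h | h
        · exact absurd (dT_zero hch hme h) hes
        · exact h
      have hklen : (PySem.Dict.keys (PySem.Dict.mk orbits)).length = orbits.length := by
        simp [PySem.Dict.keys]
      have hlenS : (ancChain (PySem.Dict.mk orbits) (orbits.length + 1) s0).length
          ≤ orbits.length + 1 := by
        have := pchain_length_le (hch s0) (hndAll s0)
        omega
      have hlenE : (ancChain (PySem.Dict.mk orbits) (orbits.length + 1) e0).length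
          ≤ orbits.length + 1 := by
        have := pchain_length_le (hch e0) (hndAll e0)
        omega
      have hjlt := jIdx_lt hme
      have hilt := List.idxOf_lt_length_of_mem (mNode_mem_cS hme)
      have hfuel : dT (PySem.Dict.mk orbits) (orbits.length + 1) s0 e0
          ≤ 0 + (2 * orbits.length + 2) := by
        unfold dT
        omega
      have hIst0 : ∀ v, v ∈ [s0] ↔
          (Meets (PySem.Dict.mk orbits) (orbits.length + 1) s0 v ∧
            dT (PySem.Dict.mk orbits) (orbits.length + 1) s0 v = 0 ∧
            v ≠ "YOU" ∧ v ≠ "SAN") := by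
        intro v
        simp only [List.mem_singleton]
        constructor
        · rintro rfl
          exact ⟨meets_self _ _ _, dT_self hch, hsY, hsS⟩
        · rintro ⟨hm, hd, _, _⟩
          exact dT_zero hch hm hd
      have hIvis0 : ∀ v, (PySem.Dict.get? (PySem.Dict.insert (PySem.Dict.insert
          (PySem.Dict.insert PySem.Dict.empty s0 (1 : Int)) "YOU" 1) "SAN" 1) v).isSome ↔
          (v = "YOU" ∨ v = "SAN" ∨
            (Meets (PySem.Dict.mk orbits) (orbits.length + 1) s0 v ∧
              dT (PySem.Dict.mk orbits) (orbits.length + 1) s0 v ≤ 0)) := by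
        intro v
        rw [get?_vis0 s0 v]
        split_ifs with hcond
        · simp only [Option.isSome_some, true_iff]
          rcases hcond with h | h | h
          · exact Or.inr (Or.inl h)
          · exact Or.inl h
          · subst h
            exact Or.inr (Or.inr ⟨meets_self _ _ _, by rw [dT_self hch]⟩)
        · simp only [Option.isSome_none, Bool.false_eq_true, false_iff]
          rintro (h | h | ⟨hm, hd⟩)
          · exact hcond (Or.inr (Or.inl h))
          · exact hcond (Or.inl h)
          · exact hcond (Or.inr (Or.inr (dT_zero hch hm (by omega))))
      have hA := loop_correct hch (hndAll s0) hcons1 hcons2 hbY hbS hY hme heY heS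
        (2 * orbits.length + 2) 0 [s0] _ hIst0 hIvis0 hL1 hfuel
      obtain ⟨hdin0, hdout0⟩ := buildDist_chain (hch s0) (hndAll s0) (orbits.length + 2) 0
        PySem.Dict.empty (by intro x hx; simp) (by omega)
      have hB := walkUp_correct hch
        (fun x hx => by rw [hdin0 x hx]; norm_num)
        (fun x hx => by rw [hdout0 x hx]; simp)
        orbits.length e0 0 hme (by omega)
      rw [hAeq, if_neg hse, hBeq, hB]
      rw [show ((0 : Nat) : Int) = (0 : Int) from rfl] at hA
      rw [hA]
      norm_num
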